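-- pv_equiv track=rewrite | github.com/ZotovPhill/Training_Repo | censored.py | for_assighment_censored
-- ===== SOURCE A (Python) =====
-- def for_assighment_censored(censored, vowels):
--     censored_list = list(censored)
--     vowels_list = list(vowels)
--     vowels_list.reverse()
--     for index, letter in enumerate(censored_list):
--         if letter != "*":
--             continue
--         else:
--             a = vowels_list.pop()
--             censored_list[index] = a
--     return "".join(censored_list)
-- ===== SOURCE B (Python) =====
-- def for_assighment_censored(censored, vowels):
--     parts = censored.split("*")
--     out = [parts[0]]
--     for i in range(len(parts) - 1):
--         out.append(vowels[i])
--         out.append(parts[i + 1])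
--     return "".join(out)
-- ===== Notes on version B (the rewrite author's own statement) =====
-- stated objective: simpler
-- what changed: B splits the string on '*' once and interleaves successive vowels between the parts via join, instead of A's in-place char-list mutation driven by reversing the vowel list and popping it inside an enumerate loop.
import Mathlib
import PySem

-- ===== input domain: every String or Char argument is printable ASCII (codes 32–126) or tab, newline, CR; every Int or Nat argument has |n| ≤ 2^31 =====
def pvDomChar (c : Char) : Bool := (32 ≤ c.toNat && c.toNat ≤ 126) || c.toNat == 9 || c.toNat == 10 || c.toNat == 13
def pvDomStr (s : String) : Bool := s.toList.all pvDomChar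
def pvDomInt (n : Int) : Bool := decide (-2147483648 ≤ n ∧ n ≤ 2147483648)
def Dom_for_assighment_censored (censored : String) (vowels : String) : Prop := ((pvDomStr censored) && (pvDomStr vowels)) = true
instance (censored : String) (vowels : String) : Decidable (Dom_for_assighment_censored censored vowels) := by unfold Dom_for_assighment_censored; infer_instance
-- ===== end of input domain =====

-- B replaces A's reverse/pop in-place mutation by split-on-'*' and interleaving vowels
-- between the parts (objective: simpler; same cost).

-- ===== PORT A =====
-- A's enumerate loop over the char list: non-'*' chars are kept, each '*' is replaced
-- by vowels_list.pop() (the last element of the reversed vowel list, which we carry as state).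
-- On pop from empty (Python IndexError, excluded by Pre_) the recursion stops.
def pvALoop : List Char → List Char → List Char
  | [], _ => []
  | c :: rest, vs =>
    if c ≠ '*' then c :: pvALoop rest vs
    else
      match vs.getLast? with
      | some a => a :: pvALoop rest vs.dropLast
      | none => []  -- IndexError in Python; outside Pre_

def for_assighment_censored (censored : String) (vowels : String) : String :=
  let censoredList := censored.toList
  let vowelsList := vowels.toList.reverse
  String.mk (pvALoop censoredList vowelsList)

-- ===== PORT B =====
-- censored.split("*"), transcribed on List Char (Python split: "" → [""]).
def pvSplitStar : List Char → List (List Char)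
  | [] => [[]]
  | c :: rest =>
    let r := pvSplitStar rest
    if c = '*' then [] :: r
    else
      match r with
      | p :: ps => (c :: p) :: ps
      | [] => [[c]]  -- unreachable: pvSplitStar is never []

-- B's loop: out starts with parts[0]; each step appends vowels[i] and parts[i+1],
-- i.e. the vowel list is consumed front to back, one per remaining part.
def pvBLoop : List (List Char) → List Char → List Char
  | [], _ => []
  | [p], _ => p
  | p :: q :: ps, vs =>
    match vs with
    | v :: vs' => p ++ v :: pvBLoop (q :: ps) vs'
    | [] => p  -- IndexError in Python; outside Pre_

def for_assighment_censored_alt (censored : String) (vowels : String) : String :=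
  String.mk (pvBLoop (pvSplitStar censored.toList) vowels.toList)

-- ===== PRECONDITION & SPEC =====
-- Pre_ excludes inputs with more '*' than vowels, on which BOTH Pythons raise IndexError.
def Pre_for_assighment_censored (censored : String) (vowels : String) : Prop :=
  censored.toList.count '*' ≤ vowels.toList.length
instance (censored : String) (vowels : String) : Decidable (Pre_for_assighment_censored censored vowels) := by
  unfold Pre_for_assighment_censored; infer_instance

def pvWitness_for_assighment_censored : String × String := ("c*ns*r*d", "eoe")

def Spec_for_assighment_censored (censored : String) (vowels : String) (out : String) : Prop := out = for_assighment_censored_alt censored vowels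
instance (censored : String) (vowels : String) (out : String) : Decidable (Spec_for_assighment_censored censored vowels out) := by unfold Spec_for_assighment_censored; infer_instance

-- ===== CLAIM (what is proved, stated in full; the proofs are below) =====
def Claim_equal_for_assighment_censored : Prop := ∀ (censored : String) (vowels : String), Dom_for_assighment_censored censored vowels → Pre_for_assighment_censored censored vowels → Spec_for_assighment_censored censored vowels (for_assighment_censored censored vowels)

-- ===== LEMMAS AND PROOFS =====

-- A's loop on the reversed vowel list consumes the original vowels front to back.
def pvSub : List Char → List Char → List Char
  | [], _ => []
  | c :: rest, vs =>
    if c = '*' then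
      match vs with
      | v :: vs' => v :: pvSub rest vs'
      | [] => []
    else c :: pvSub rest vs

theorem pvALoop_reverse (cs vs : List Char) : pvALoop cs vs.reverse = pvSub cs vs := by
  induction cs generalizing vs with
  | nil => rfl
  | cons c rest ih =>
    by_cases h : c = '*'
    · subst h
      cases vs with
      | nil => simp [pvALoop, pvSub]
      | cons v vs' =>
        simp [pvALoop, pvSub, List.getLast?_reverse, ih]
    · simp [pvALoop, pvSub, h, ih]

theorem pvSplitStar_ne_nil (cs : List Char) : pvSplitStar cs ≠ [] := by
  cases cs with
  | nil => simp [pvSplitStar]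
  | cons c rest =>
    simp only [pvSplitStar]
    split
    · simp
    · cases h : pvSplitStar rest <;> simp

theorem pvBLoop_cons_head (c : Char) (p : List Char) (ps : List (List Char)) (vs : List Char) :
    pvBLoop ((c :: p) :: ps) vs = c :: pvBLoop (p :: ps) vs := by
  cases ps with
  | nil => rfl
  | cons q ps' =>
    cases vs with
    | nil => rfl
    | cons v vs' => simp [pvBLoop]

theorem pvSub_eq_pvBLoop (cs vs : List Char) : pvSub cs vs = pvBLoop (pvSplitStar cs) vs := by
  induction cs generalizing vs with
  | nil => rfl
  | cons c rest ih =>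
    by_cases h : c = '*'
    · subst h
      cases vs with
      | nil =>
        obtain ⟨p, ps, hps⟩ := List.exists_cons_of_ne_nil (pvSplitStar_ne_nil rest)
        simp only [pvSub, pvSplitStar, if_true, hps, pvBLoop]
      | cons v vs' =>
        obtain ⟨p, ps, hps⟩ := List.exists_cons_of_ne_nil (pvSplitStar_ne_nil rest)
        simp only [pvSub, pvSplitStar, if_true, hps, pvBLoop, List.nil_append]
        rw [← hps, ih]
    · simp only [pvSub, pvSplitStar, if_neg h]
      obtain ⟨p, ps, hps⟩ := List.exists_cons_of_ne_nil (pvSplitStar_ne_nil rest)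
      rw [hps, pvBLoop_cons_head, ← hps, ih]

-- ===== VERDICT (by name: the statement is the Claim_ definition above) =====
theorem for_assighment_censored_spec : Claim_equal_for_assighment_censored := by
  intro censored vowels _ _
  show String.mk (pvALoop censored.toList vowels.toList.reverse) =
    String.mk (pvBLoop (pvSplitStar censored.toList) vowels.toList)
  rw [pvALoop_reverse, pvSub_eq_pvBLoop]
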